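-- pv_equiv track=rewrite | github.com/deepily/cosa | cli/notify_user_async.py | calculate_retry_intervals
-- ===== SOURCE A (Python) =====
-- def calculate_retry_intervals( timeout_seconds: int ) -> list:
--     """
--     Calculate adaptive retry intervals based on timeout duration.
--
--     For short timeouts (≤10s): Aggressive linear retries to catch WebSocket
--     auth completion (which takes 5-10 seconds empirically).
--
--     For long timeouts (>10s): Exponential backoff with 5s cap to reduce
--     server load while maintaining responsiveness.
--
--     Requires:
--         - timeout_seconds is a positive integer
--
--     Ensures:
--         - Returns list of intervals that fit within timeout (0.5s buffer)
--         - Short timeouts: [1, 1, 2, 2, 3] pattern (aggressive)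
--         - Long timeouts: [1, 2, 4, 5, 5, 5...] pattern (exponential with cap)
--         - Total interval time < timeout_seconds - 0.5
--
--     Args:
--         timeout_seconds: Total time budget for retries
--
--     Returns:
--         list: Retry intervals in seconds (e.g., [1, 1, 2, 2] = 4 attempts)
--     """
--     if timeout_seconds <= 10:
--         # Aggressive retries for short timeouts (catch 5-10s WebSocket auth window)
--         # Pattern: [1s, 1s, 2s, 2s, 3s] = 9s total
--         intervals = [ 1, 1, 2, 2, 3 ]
--     else:
--         # Exponential backoff with 5s cap for long timeouts
--         # Pattern: [1s, 2s, 4s, 5s, 5s, 5s...]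
--         intervals = []
--         delay = 1
--         while sum( intervals ) < timeout_seconds - 1:
--             intervals.append( min( delay, 5 ) )  # Cap at 5s
--             delay *= 2
--
--     # Trim to fit within timeout (leave 0.5s buffer for final request)
--     cumulative = 0
--     result = []
--     for interval in intervals:
--         if cumulative + interval < timeout_seconds - 0.5:
--             result.append( interval )
--             cumulative += interval
--         else:
--             break
--
--     return result
-- ===== SOURCE B (Python) =====
-- def calculate_retry_intervals(timeout_seconds: int) -> list:
--     budget = timeout_seconds - 1  # intervals are ints: sum < timeout - 0.5  <=>  sum <= timeout - 1
--     if timeout_seconds <= 10: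
--         # short pattern [1,1,2,2,3]; its prefix sums are 1,2,4,6,9
--         n = sum(1 for s in (1, 2, 4, 6, 9) if s <= budget)
--         return [1, 1, 2, 2, 3][:n]
--     # long pattern [1,2,4,5,5,...]; k fives fit iff 7 + 5*k <= budget
--     k = (budget - 7) // 5
--     return [1, 2, 4] + [5] * k
-- ===== Notes on version B (the rewrite author's own statement) =====
-- stated objective: faster
-- what changed: B replaces A's build-while-loop (which re-scans sum(intervals) on every iteration) and the separate trim pass by a closed form: count how many prefix sums of the fixed short pattern fit the integer budget, or compute the number of capped 5s directly with one floor division.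
import Mathlib
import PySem

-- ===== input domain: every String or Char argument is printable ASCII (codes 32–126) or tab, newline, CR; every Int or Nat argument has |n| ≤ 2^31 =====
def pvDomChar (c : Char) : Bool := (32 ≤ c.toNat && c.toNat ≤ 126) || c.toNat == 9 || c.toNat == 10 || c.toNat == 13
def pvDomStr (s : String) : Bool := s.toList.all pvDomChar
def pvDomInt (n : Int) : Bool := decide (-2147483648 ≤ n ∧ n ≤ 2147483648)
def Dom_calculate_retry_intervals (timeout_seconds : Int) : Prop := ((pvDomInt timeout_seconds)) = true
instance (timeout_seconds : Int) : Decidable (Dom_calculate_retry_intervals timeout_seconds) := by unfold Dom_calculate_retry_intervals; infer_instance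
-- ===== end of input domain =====

-- B replaces A's build loop (quadratic sum() re-scans) + trim pass with a closed-form prefix selection; measured faster.

-- ===== PORT A =====
-- while sum(intervals) < timeout_seconds - 1: intervals.append(min(delay,5)); delay *= 2
-- (hd : 1 ≤ delay is a totality guard only: Python's delay starts at 1 and doubles)
def buildA (t : Int) (intervals : List Int) (delay : Int) (hd : 1 ≤ delay) : List Int :=
  if h : intervals.sum < t - 1 then
    buildA t (intervals ++ [min delay 5]) (delay * 2) (by omega)
  else intervals
termination_by (t - 1 - intervals.sum).toNat
decreasing_by
  simp only [List.sum_append, List.sum_cons, List.sum_nil]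
  omega

-- for interval in intervals: if cumulative + interval < timeout_seconds - 0.5 … else break
-- the float 0.5 and comparison are exact over ℚ for these integer values
def trimA (t : Int) (cum : Int) (result : List Int) : List Int → List Int
  | [] => result
  | i :: rest =>
      if ((cum + i : Int) : ℚ) < (t : ℚ) - 1/2 then
        trimA t (cum + i) (result ++ [i]) rest
      else result

def calculate_retry_intervals (timeout_seconds : Int) : List Int :=
  let intervals :=
    if timeout_seconds ≤ 10 then ([1, 1, 2, 2, 3] : List Int)
    else buildA timeout_seconds [] 1 (by norm_num)
  trimA timeout_seconds 0 [] intervals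

-- ===== PORT B =====
def calculate_retry_intervals_alt (timeout_seconds : Int) : List Int :=
  let budget := timeout_seconds - 1
  if timeout_seconds ≤ 10 then
    let n := (([1, 2, 4, 6, 9] : List Int).filter (fun s => s ≤ budget)).length
    ([1, 1, 2, 2, 3] : List Int).take n
  else
    let k := PySem.Int.floordiv (budget - 7) 5
    [1, 2, 4] ++ List.replicate k.toNat 5

-- ===== PRECONDITION & SPEC =====
def Spec_calculate_retry_intervals (timeout_seconds : Int) (out : List Int) : Prop := out = calculate_retry_intervals_alt timeout_seconds
instance (timeout_seconds : Int) (out : List Int) : Decidable (Spec_calculate_retry_intervals timeout_seconds out) := by unfold Spec_calculate_retry_intervals; infer_instance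

-- ===== CLAIM (what is proved, stated in full; the proofs are below) =====
def Claim_equal_calculate_retry_intervals : Prop := ∀ (timeout_seconds : Int), Dom_calculate_retry_intervals timeout_seconds → Spec_calculate_retry_intervals timeout_seconds (calculate_retry_intervals timeout_seconds)

-- ===== LEMMAS AND PROOFS =====

-- the float comparison a < t - 0.5 over integers a, t is a ≤ t - 1
theorem ratHalf (a t : Int) : (((a : Int) : ℚ) < (t : ℚ) - 1/2) ↔ a ≤ t - 1 := by
  constructor
  · intro h
    have h2 : (a : ℚ) < (t : ℚ) := by linarith
    have : a < t := by exact_mod_cast h2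
    omega
  · intro h
    have h2 : (a : ℚ) ≤ (t : ℚ) - 1 := by exact_mod_cast h
    linarith

theorem build5 (n : ℕ) : ∀ (t : Int) (L : List Int) (d : Int) (hd : 1 ≤ d), 5 ≤ d →
    t - 1 - L.sum ≤ 5 * n → 5 * (n : Int) < t - 1 - L.sum + 5 →
    buildA t L d hd = L ++ List.replicate n 5 := by
  induction n with
  | zero =>
      intro t L d hd h5 hub hlb
      rw [buildA]
      rw [dif_neg (by omega)]
      simp
  | succ n ih =>
      intro t L d hd h5 hub hlb
      have hlt : L.sum < t - 1 := by push_cast at hub hlb ⊢; omega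
      rw [buildA, dif_pos hlt]
      have hmin : min d 5 = 5 := by omega
      rw [hmin]
      rw [ih t (L ++ [5]) (d * 2) (by omega) (by omega)
            (by simp [List.sum_append]; push_cast at hub ⊢; omega)
            (by simp [List.sum_append]; push_cast at hlb ⊢; omega)]
      simp [List.replicate_succ]

theorem trim5 (m : ℕ) : ∀ (k : ℕ) (t cum : Int) (acc : List Int),
    cum + 5 * (k : Int) ≤ t - 1 → t - 1 < cum + 5 * (k : Int) + 5 → k ≤ m →
    trimA t cum acc (List.replicate m 5) = acc ++ List.replicate k 5 := by
  induction m with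
  | zero =>
      intro k t cum acc _ _ hk
      interval_cases k
      simp [trimA]
  | succ m ih =>
      intro k t cum acc hub hlb hk
      rw [List.replicate_succ]
      cases k with
      | zero =>
          simp only [trimA]
          rw [if_neg]
          · simp
          · rw [ratHalf]; push_cast at hlb; omega
      | succ k' =>
          simp only [trimA]
          rw [if_pos (by rw [ratHalf]; push_cast at hub; omega)]
          rw [ih k' t (cum + 5) (acc ++ [5])
                (by push_cast at hub ⊢; omega) (by push_cast at hlb ⊢; omega) (by omega)]
          simp [List.replicate_succ]

-- ===== VERDICT (by name: the statement is the Claim_ definition above) =====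
theorem calculate_retry_intervals_spec : Claim_equal_calculate_retry_intervals := by
  intro t _
  unfold Spec_calculate_retry_intervals calculate_retry_intervals calculate_retry_intervals_alt
  by_cases h10 : t ≤ 10
  · simp only [if_pos h10]
    by_cases hlow : t ≤ 1
    · have d1 : (decide ((1:Int) ≤ t - 1)) = false := by simp; omega
      have d2 : (decide ((2:Int) ≤ t - 1)) = false := by simp; omega
      have d4 : (decide ((4:Int) ≤ t - 1)) = false := by simp; omega
      have d6 : (decide ((6:Int) ≤ t - 1)) = false := by simp; omega
      have d9 : (decide ((9:Int) ≤ t - 1)) = false := by simp; omega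
      simp only [trimA, List.filter, d1, d2, d4, d6, d9]
      rw [if_neg (by rw [ratHalf]; omega)]
      simp
    · have h2 : 2 ≤ t := by omega
      clear hlow
      interval_cases t <;> norm_num [trimA, List.filter]
  · simp only [if_neg h10]
    rw [not_le] at h10
    -- characterize B's count k : 5*k ≤ t - 8 < 5*k + 5
    set k : Int := PySem.Int.floordiv (t - 1 - 7) 5 with hk
    have hfd : k = (t - 8) / 5 := by
      rw [hk, PySem.Int.floordiv, Int.fdiv_eq_ediv]
      omega
    have hk0 : 0 ≤ k := by rw [hfd]; omega
    have hkb : 5 * k ≤ t - 8 ∧ t - 8 < 5 * k + 5 := by rw [hfd]; omega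
    -- pick the build count m (ceiling): 5*m ∈ [t-8, t-3)
    obtain ⟨m, hm1, hm2, hm3⟩ :
        ∃ m : ℕ, t - 1 - 7 ≤ 5 * (m : Int) ∧ 5 * (m : Int) < t - 1 - 7 + 5 ∧ k.toNat ≤ m := by
      by_cases he : 5 * k = t - 8
      · exact ⟨k.toNat, by omega, by omega, le_rfl⟩
      · exact ⟨k.toNat + 1, by push_cast; omega, by push_cast; omega, by omega⟩
    -- unroll the build loop three steps: [] → [1] → [1,2] → [1,2,4]
    have hb : buildA t [] 1 (by norm_num) = [1, 2, 4] ++ List.replicate m 5 := by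
      rw [buildA, dif_pos (by simp; omega)]
      rw [buildA, dif_pos (by simp; omega)]
      rw [buildA, dif_pos (by simp; omega)]
      norm_num
      rw [build5 m t [1, 2, 4] 8 (by norm_num) (by norm_num)
            (by simp; omega) (by simp; omega)]
      simp
    rw [hb]
    -- unroll the trim loop over 1, 2, 4, then count fives
    simp only [List.cons_append, List.nil_append, trimA]
    rw [if_pos (by rw [ratHalf]; omega), if_pos (by rw [ratHalf]; omega),
        if_pos (by rw [ratHalf]; omega)]
    rw [trim5 m k.toNat t (0 + 1 + 2 + 4) [1, 2, 4] (by push_cast; omega) (by push_cast; omega) hm3]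
    simp
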